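-- pv_equiv track=rewrite | github.com/J22Pregbaha/python-tutorials | challenges/bounded-ratio.py | boundedRatio
-- ===== SOURCE A (Python) =====
-- def boundedRatio(a, l, r):
--     final_array = []
--
--     for index, element in enumerate(a):
--         count = 0
--         for i in range(l, r + 1):
--             if (index + 1) * i == element:
--                 count += 1
--                 break
--         if count > 0:
--             final_array.append(True)
--         else:
--             final_array.append(False)
--
--     return final_array
-- ===== SOURCE B (Python) =====
-- def boundedRatio(a, l, r):
--     return [e % (i + 1) == 0 and l <= e // (i + 1) <= r for i, e in enumerate(a)]
-- ===== Notes on version B (the rewrite author's own statement) =====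
-- stated objective: faster
-- what changed: Replaces the inner scan over range(l, r+1) by a single divisibility test and quotient bound check per element, making the function one pass.
import Mathlib
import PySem

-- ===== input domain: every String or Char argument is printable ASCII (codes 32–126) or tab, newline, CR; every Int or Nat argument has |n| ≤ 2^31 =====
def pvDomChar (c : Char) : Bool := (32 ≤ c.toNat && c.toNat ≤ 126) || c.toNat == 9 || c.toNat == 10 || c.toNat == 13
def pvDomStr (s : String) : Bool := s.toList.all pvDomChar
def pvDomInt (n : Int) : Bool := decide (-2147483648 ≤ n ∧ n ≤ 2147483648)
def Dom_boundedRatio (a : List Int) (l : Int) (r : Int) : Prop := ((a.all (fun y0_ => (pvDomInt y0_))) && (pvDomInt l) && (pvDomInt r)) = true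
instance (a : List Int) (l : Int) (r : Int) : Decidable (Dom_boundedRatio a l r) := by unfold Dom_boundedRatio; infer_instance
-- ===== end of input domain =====

-- ===== PORT A =====
-- B replaces A's inner scan over range(l, r+1) by a divisibility/quotient-bound test (objective: faster; asymptotic).
-- inner for-loop of A: count becomes 1 at the first i with (index+1)*i == element (break), else 0
def pvInnerA (k e : Int) : List Int → Int
  | [] => 0
  | i :: rest => if k * i == e then 0 + 1 else pvInnerA k e rest

def pvLoopA (l r : Int) : List (Int × Int) → List Bool
  | [] => []
  | (idx, e) :: rest =>
      let count := pvInnerA (idx + 1) e (PySem.List.pyRange l (r + 1) 1)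
      (if count > 0 then true else false) :: pvLoopA l r rest

def boundedRatio (a : List Int) (l : Int) (r : Int) : List Bool :=
  pvLoopA l r (PySem.List.enumerate a)

-- ===== PORT B =====
def boundedRatio_alt (a : List Int) (l : Int) (r : Int) : List Bool :=
  (PySem.List.enumerate a).map (fun p =>
    decide (PySem.Int.mod p.2 (p.1 + 1) = 0 ∧
            l ≤ PySem.Int.floordiv p.2 (p.1 + 1) ∧ PySem.Int.floordiv p.2 (p.1 + 1) ≤ r))

-- ===== PRECONDITION & SPEC =====
def Spec_boundedRatio (a : List Int) (l : Int) (r : Int) (out : List Bool) : Prop := out = boundedRatio_alt a l r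
instance (a : List Int) (l : Int) (r : Int) (out : List Bool) : Decidable (Spec_boundedRatio a l r out) := by unfold Spec_boundedRatio; infer_instance

-- ===== CLAIM =====
def Claim_equal_boundedRatio : Prop := ∀ (a : List Int) (l : Int) (r : Int), Dom_boundedRatio a l r → Spec_boundedRatio a l r (boundedRatio a l r)

-- ===== LEMMAS AND PROOFS =====
lemma pvInnerA_pos_iff (k e : Int) (lst : List Int) :
    0 < pvInnerA k e lst ↔ ∃ i ∈ lst, k * i = e := by
  induction lst with
  | nil => simp [pvInnerA]
  | cons i rest ih =>
      simp only [pvInnerA]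
      by_cases h : k * i = e
      · simp [h]
      · simp [h, ih]

lemma pvElem_eq (k e l r : Int) (hk : 0 < k) :
    (if 0 < pvInnerA k e (PySem.List.pyRange l (r + 1) 1) then true else false) =
      decide (PySem.Int.mod e k = 0 ∧
              l ≤ PySem.Int.floordiv e k ∧ PySem.Int.floordiv e k ≤ r) := by
  rw [PySem.Int.mod_eq_emod_of_pos hk, PySem.Int.floordiv_eq_ediv_of_pos hk]
  by_cases h : 0 < pvInnerA k e (PySem.List.pyRange l (r + 1) 1)
  · obtain ⟨i, hmem, hie⟩ := (pvInnerA_pos_iff k e _).mp h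
    rw [PySem.List.mem_pyRange_one] at hmem
    have hdvd : k ∣ e := ⟨i, hie.symm⟩
    have hq : e / k = i := by
      rw [← hie]; exact Int.mul_ediv_cancel_left i (ne_of_gt hk)
    rw [if_pos h]; symm; rw [decide_eq_true_iff]
    exact ⟨Int.emod_eq_zero_of_dvd hdvd, by omega, by omega⟩
  · rw [if_neg h]; symm; rw [decide_eq_false_iff_not]
    rintro ⟨hmod, hl, hr⟩
    exact h ((pvInnerA_pos_iff k e _).mpr
      ⟨e / k, PySem.List.mem_pyRange_one.mpr ⟨hl, by omega⟩,
        Int.mul_ediv_cancel' (Int.dvd_of_emod_eq_zero hmod)⟩)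

lemma pvLoopA_eq (l r : Int) (ps : List (Int × Int)) (hps : ∀ p ∈ ps, 0 ≤ p.1) :
    pvLoopA l r ps = ps.map (fun p =>
      decide (PySem.Int.mod p.2 (p.1 + 1) = 0 ∧
              l ≤ PySem.Int.floordiv p.2 (p.1 + 1) ∧ PySem.Int.floordiv p.2 (p.1 + 1) ≤ r)) := by
  induction ps with
  | nil => rfl
  | cons p rest ih =>
      obtain ⟨idx, e⟩ := p
      have h0 : (0:Int) ≤ idx := hps (idx, e) (List.mem_cons_self ..)
      simp only [pvLoopA, List.map_cons]
      rw [pvElem_eq (idx + 1) e l r (by omega),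
        ih fun q hq => hps q (List.mem_cons_of_mem _ hq)]

lemma enumerate_fst_nonneg (a : List Int) (p : Int × Int)
    (hp : p ∈ PySem.List.enumerate a) : 0 ≤ p.1 := by
  rw [PySem.List.mem_enumerate_iff] at hp
  obtain ⟨k, hk, rfl⟩ := hp
  simp

-- ===== VERDICT =====
theorem boundedRatio_spec : Claim_equal_boundedRatio := by
  intro a l r _
  unfold Spec_boundedRatio boundedRatio boundedRatio_alt
  exact pvLoopA_eq l r _ (enumerate_fst_nonneg a)
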